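-- pv_equiv track=rewrite | github.com/pmbaumgartner/remerge-mwe | scripts/mwe_eval/match.py | suppress_subspan_types
-- ===== SOURCE A (Python) =====
-- def _tuple_is_subspan(candidate: tuple[str, ...], container: tuple[str, ...]) -> bool:
--     if len(candidate) >= len(container):
--         return False
--     width = len(candidate)
--     for start in range(0, len(container) - width + 1):
--         if container[start : start + width] == candidate:
--             return True
--     return False
--
-- def suppress_subspan_types(types: set[tuple[str, ...]]) -> set[tuple[str, ...]]:
--     if not types:
--         return set()
--
--     filtered: set[tuple[str, ...]] = set()
--     for candidate in types:
--         if any(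
--             _tuple_is_subspan(candidate, other) for other in types if other != candidate
--         ):
--             continue
--         filtered.add(candidate)
--     return filtered
-- ===== SOURCE B (Python) =====
-- def suppress_subspan_types(types):
--     # One generating pass: for every tuple, look up each proper contiguous
--     # subspan whose width is an actual candidate length in the candidate set,
--     # recording the candidates that occur; then keep the candidates never recorded.
--     candidates = set(types)
--     widths = {len(t) for t in types}
--     suppressed = set()
--     for t in types:
--         n = len(t)
--         for w in widths:
--             if w < n:
--                 for start in range(n - w + 1):
--                     sub = t[start : start + w]
--                     if sub in candidates:
--                         suppressed.add(sub)
--     return {t for t in types if t not in suppressed}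
-- ===== Notes on version B (the rewrite author's own statement) =====
-- stated objective: faster
-- what changed: Instead of testing each candidate by sliding-window scans against every other tuple, B makes one generating pass that looks each proper contiguous subspan (restricted to widths that occur as candidate lengths) up in a candidate set, then keeps the candidates never found.
import Mathlib
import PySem

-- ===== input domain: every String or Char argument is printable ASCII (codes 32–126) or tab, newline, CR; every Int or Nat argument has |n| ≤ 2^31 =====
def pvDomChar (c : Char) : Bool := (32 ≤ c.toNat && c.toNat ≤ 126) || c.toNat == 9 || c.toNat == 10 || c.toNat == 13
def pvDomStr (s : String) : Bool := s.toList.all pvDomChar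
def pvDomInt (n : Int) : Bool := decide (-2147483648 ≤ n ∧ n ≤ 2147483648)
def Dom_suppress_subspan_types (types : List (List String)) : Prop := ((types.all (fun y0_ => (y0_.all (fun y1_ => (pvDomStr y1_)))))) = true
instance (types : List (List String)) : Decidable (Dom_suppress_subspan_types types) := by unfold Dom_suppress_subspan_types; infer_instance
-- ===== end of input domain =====

-- B replaces per-candidate pairwise window scans by one subspan-generating pass over a candidate set, then a membership pass (measured faster on the timing inputs).
-- ===== PORT A =====
-- helper: _tuple_is_subspan
def tupleIsSubspan (candidate container : List String) : Bool :=
  if candidate.length ≥ container.length then false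
  else
    (PySem.List.pyRange 0 ((container.length : Int) - (candidate.length : Int) + 1) 1).any
      (fun start =>
        PySem.List.slice container (some start) (some (start + (candidate.length : Int))) == candidate)

def suppress_subspan_types (types : List (List String)) : List (List String) :=
  if types = [] then []
  else
    types.foldl
      (fun filtered candidate =>
        if types.any (fun other => (other != candidate) && tupleIsSubspan candidate other)
        then filtered
        else PySem.Set.add filtered candidate)
      []

-- ===== PORT B =====
-- B: one generating pass looks each proper contiguous subspan whose width is an actual
-- candidate length up in the candidate set, recording the candidates that occur;
-- then one membership pass keeps the candidates never recorded.
def buildSuppressed (types : List (List String)) : PySem.Set (List String) :=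
  let candidates := PySem.Set.ofList types
  let widths := PySem.Set.ofList (types.map List.length)
  types.foldl
    (fun suppressed t =>
      widths.foldl
        (fun (suppressed : PySem.Set (List String)) (w : Nat) =>
          if w < t.length then
            (PySem.List.pyRange 0 ((t.length : Int) - (w : Int) + 1) 1).foldl
              (fun suppressed start =>
                let sub := PySem.List.slice t (some start) (some (start + (w : Int)))
                if PySem.Set.contains candidates sub
                then PySem.Set.add suppressed sub
                else suppressed)
              suppressed
          else suppressed)
        suppressed)
    []

def suppress_subspan_types_alt (types : List (List String)) : List (List String) :=
  let suppressed := buildSuppressed types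
  types.foldl
    (fun out t => if PySem.Set.contains suppressed t then out else PySem.Set.add out t)
    []

-- ===== PRECONDITION & SPEC =====
def Spec_suppress_subspan_types (types : List (List String)) (out : List (List String)) : Prop := out = suppress_subspan_types_alt types
instance (types : List (List String)) (out : List (List String)) : Decidable (Spec_suppress_subspan_types types out) := by unfold Spec_suppress_subspan_types; infer_instance

-- ===== CLAIM (what is proved, stated in full; the proofs are below) =====
def Claim_equal_suppress_subspan_types : Prop := ∀ (types : List (List String)), Dom_suppress_subspan_types types → Spec_suppress_subspan_types types (suppress_subspan_types types)

-- ===== LEMMAS AND PROOFS =====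

-- P c t : c is a proper contiguous subspan of t
def ProperSub (c t : List String) : Prop :=
  c.length < t.length ∧ ∃ s : Nat, s + c.length ≤ t.length ∧ (t.drop s).take c.length = c

theorem tupleIsSubspan_iff (c t : List String) :
    tupleIsSubspan c t = true ↔ ProperSub c t := by
  unfold tupleIsSubspan ProperSub
  split_ifs with h
  · simp only [false_iff, not_and]
    intro h1
    omega
  · simp only [List.any_eq_true, PySem.List.mem_pyRange_one, beq_iff_eq]
    constructor
    · rintro ⟨start, ⟨h0, hlt⟩, hs⟩
      refine ⟨by omega, start.toNat, by omega, ?_⟩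
      rw [PySem.List.slice_toNat (xs := t) h0 (by omega)] at hs
      have heq : (start + (c.length : Int)).toNat - start.toNat = c.length := by omega
      rwa [heq] at hs
    · rintro ⟨hlt, s, hle, hs⟩
      refine ⟨(s : Int), ⟨by omega, by omega⟩, ?_⟩
      rw [PySem.List.slice_toNat (xs := t) (by omega) (by omega)]
      have heq : ((s : Int) + (c.length : Int)).toNat - (s : Int).toNat = c.length := by omega
      rw [heq]
      exact hs

theorem mem_foldl_of_step {α β : Type} (step : List β → α → List β) (Q : α → β → Prop)
    (h : ∀ s x c, c ∈ step s x ↔ c ∈ s ∨ Q x c) :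
    ∀ (xs : List α) (s : List β) (c : β), c ∈ xs.foldl step s ↔ c ∈ s ∨ ∃ x ∈ xs, Q x c := by
  intro xs
  induction xs with
  | nil => simp
  | cons y ys ih =>
    intro s c
    simp only [List.foldl_cons, ih, h, List.mem_cons]
    constructor
    · rintro ((hs | hq) | ⟨x, hx, hq⟩)
      · exact Or.inl hs
      · exact Or.inr ⟨y, Or.inl rfl, hq⟩
      · exact Or.inr ⟨x, Or.inr hx, hq⟩
    · rintro (hs | ⟨x, (rfl | hx), hq⟩)
      · exact Or.inl (Or.inl hs)
      · exact Or.inl (Or.inr hq)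
      · exact Or.inr ⟨x, hx, hq⟩

theorem slice_nat_iff (c t : List String) (w : Nat) :
    (∃ st ∈ PySem.List.pyRange 0 ((t.length : Int) - (w : Int) + 1) 1,
        c = PySem.List.slice t (some st) (some (st + (w : Int))))
      ↔ ∃ s : Nat, s + w ≤ t.length ∧ (t.drop s).take w = c := by
  simp only [PySem.List.mem_pyRange_one]
  constructor
  · rintro ⟨st, ⟨h0, hlt⟩, hc⟩
    rw [PySem.List.slice_toNat (xs := t) h0 (by omega)] at hc
    have heq : (st + (w : Int)).toNat - st.toNat = w := by omega
    rw [heq] at hc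
    exact ⟨st.toNat, by omega, hc.symm⟩
  · rintro ⟨s, hle, hs⟩
    refine ⟨(s : Int), ⟨by omega, by omega⟩, ?_⟩
    rw [PySem.List.slice_toNat (xs := t) (by omega) (by omega)]
    have heq : ((s : Int) + (w : Int)).toNat - (s : Int).toNat = w := by omega
    rw [heq]
    exact hs.symm

theorem mem_buildSuppressed (types : List (List String)) (c : List String) :
    c ∈ buildSuppressed types ↔ (∃ t ∈ types, ProperSub c t) ∧ c ∈ types := by
  have hstep : ∀ (t : List String) (w : Nat) (s : List (List String)) (st : Int)
      (c : List String),
      c ∈ (let sub := PySem.List.slice t (some st) (some (st + (w : Int)))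
           if PySem.Set.contains (PySem.Set.ofList types) sub
           then PySem.Set.add s sub else s)
        ↔ c ∈ s ∨ (c = PySem.List.slice t (some st) (some (st + (w : Int))) ∧ c ∈ types) := by
    intro t w s st c
    simp only []
    split_ifs with hc
    · rw [PySem.Set.mem_add]
      rw [PySem.Set.contains_iff, PySem.Set.mem_ofList] at hc
      constructor
      · rintro (h | h)
        · exact Or.inl h
        · exact Or.inr ⟨h, h ▸ hc⟩
      · rintro (h | ⟨h, _⟩)
        · exact Or.inl h
        · exact Or.inr h
    · simp only [PySem.Set.contains_iff, PySem.Set.mem_ofList] at hc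
      constructor
      · exact Or.inl
      · rintro (h | ⟨rfl, hmem⟩)
        · exact h
        · exact absurd hmem hc
  have h1 : ∀ (t : List String) (w : Nat) (s : List (List String)) (c : List String),
      c ∈ (PySem.List.pyRange 0 ((t.length : Int) - (w : Int) + 1) 1).foldl
            (fun suppressed start =>
              let sub := PySem.List.slice t (some start) (some (start + (w : Int)))
              if PySem.Set.contains (PySem.Set.ofList types) sub
              then PySem.Set.add suppressed sub else suppressed) s
        ↔ c ∈ s ∨ ∃ st ∈ PySem.List.pyRange 0 ((t.length : Int) - (w : Int) + 1) 1,
            c = PySem.List.slice t (some st) (some (st + (w : Int))) ∧ c ∈ types := by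
    intro t w s c
    exact mem_foldl_of_step _
      (fun st c => c = PySem.List.slice t (some st) (some (st + (w : Int))) ∧ c ∈ types)
      (fun s st c => hstep t w s st c) _ s c
  have h1' : ∀ (t : List String) (w : Nat) (s : List (List String)) (c : List String),
      c ∈ (if w < t.length then
            (PySem.List.pyRange 0 ((t.length : Int) - (w : Int) + 1) 1).foldl
              (fun suppressed start =>
                let sub := PySem.List.slice t (some start) (some (start + (w : Int)))
                if PySem.Set.contains (PySem.Set.ofList types) sub
                then PySem.Set.add suppressed sub else suppressed) s
           else s)
        ↔ c ∈ s ∨ (w < t.length ∧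
            ∃ st ∈ PySem.List.pyRange 0 ((t.length : Int) - (w : Int) + 1) 1,
              c = PySem.List.slice t (some st) (some (st + (w : Int))) ∧ c ∈ types) := by
    intro t w s c
    split_ifs with hw
    · rw [h1 t w s c]
      tauto
    · tauto
  have h2 : ∀ (t : List String) (s : List (List String)) (c : List String),
      c ∈ (PySem.Set.ofList (types.map List.length)).foldl
            (fun suppressed w =>
              if w < t.length then
                (PySem.List.pyRange 0 ((t.length : Int) - (w : Int) + 1) 1).foldl
                  (fun suppressed start =>
                    let sub := PySem.List.slice t (some start) (some (start + (w : Int)))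
                    if PySem.Set.contains (PySem.Set.ofList types) sub
                    then PySem.Set.add suppressed sub else suppressed)
                  suppressed
              else suppressed) s
        ↔ c ∈ s ∨ ∃ w ∈ PySem.Set.ofList (types.map List.length), w < t.length ∧
            ∃ st ∈ PySem.List.pyRange 0 ((t.length : Int) - (w : Int) + 1) 1,
              c = PySem.List.slice t (some st) (some (st + (w : Int))) ∧ c ∈ types := by
    intro t s c
    exact mem_foldl_of_step _
      (fun w c => w < t.length ∧
          ∃ st ∈ PySem.List.pyRange 0 ((t.length : Int) - (w : Int) + 1) 1,
            c = PySem.List.slice t (some st) (some (st + (w : Int))) ∧ c ∈ types)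
      (fun s w c => h1' t w s c) _ s c
  unfold buildSuppressed
  simp only []
  rw [mem_foldl_of_step _
        (fun (t : List String) (c : List String) =>
          ∃ w ∈ PySem.Set.ofList (types.map List.length), w < t.length ∧
            ∃ st ∈ PySem.List.pyRange 0 ((t.length : Int) - (w : Int) + 1) 1,
              c = PySem.List.slice t (some st) (some (st + (w : Int))) ∧ c ∈ types)
        (fun s t c => h2 t s c)]
  simp only [List.not_mem_nil, false_or]
  constructor
  · rintro ⟨t, ht, w, hwmem, hwlt, hex⟩
    have hmem : c ∈ types := by
      obtain ⟨st, -, -, h⟩ := hex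
      exact h
    have hex' : ∃ st ∈ PySem.List.pyRange 0 ((t.length : Int) - (w : Int) + 1) 1,
        c = PySem.List.slice t (some st) (some (st + (w : Int))) := by
      obtain ⟨st, h1, h2, -⟩ := hex
      exact ⟨st, h1, h2⟩
    obtain ⟨s, hle, hs⟩ := (slice_nat_iff c t w).1 hex'
    have hlen : c.length = w := by
      rw [← hs, List.length_take, List.length_drop]
      omega
    refine ⟨⟨t, ht, ?_, s, ?_, ?_⟩, hmem⟩
    · omega
    · omega
    · rw [hlen]
      exact hs
  · rintro ⟨⟨t, ht, hlt, s, hle, hs⟩, hmem⟩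
    refine ⟨t, ht, c.length, ?_, hlt, ?_⟩
    · rw [PySem.Set.mem_ofList]
      exact List.mem_map.2 ⟨c, hmem, rfl⟩
    · obtain ⟨st, h1, h2⟩ := (slice_nat_iff c t c.length).2 ⟨s, hle, hs⟩
      exact ⟨st, h1, h2, hmem⟩

theorem pred_eq (types : List (List String)) (c : List String) (hc : c ∈ types) :
    (types.any (fun other => (other != c) && tupleIsSubspan c other))
      = PySem.Set.contains (buildSuppressed types) c := by
  rw [Bool.eq_iff_iff, List.any_eq_true, PySem.Set.contains_iff, mem_buildSuppressed]
  constructor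
  · rintro ⟨o, ho, hb⟩
    simp only [Bool.and_eq_true, bne_iff_ne] at hb
    exact ⟨⟨o, ho, (tupleIsSubspan_iff c o).1 hb.2⟩, hc⟩
  · rintro ⟨⟨t, ht, hp⟩, -⟩
    refine ⟨t, ht, ?_⟩
    simp only [Bool.and_eq_true, bne_iff_ne]
    refine ⟨?_, (tupleIsSubspan_iff c t).2 hp⟩
    intro h
    subst h
    exact absurd hp.1 (lt_irrefl _)

-- ===== VERDICT (by name: the statement is the Claim_ definition above) =====
theorem suppress_subspan_types_spec : Claim_equal_suppress_subspan_types := by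
  intro types _
  unfold Spec_suppress_subspan_types suppress_subspan_types suppress_subspan_types_alt
  by_cases h : types = []
  · subst h
    rfl
  · rw [if_neg h]
    exact List.foldl_ext _ _ [] (fun filtered candidate hmem => by
      rw [pred_eq types candidate hmem])
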